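-- pv_equiv track=rewrite | github.com/lozh/python-aoc | 2023/12/aoc_12_2.py | get_part_groups
-- ===== SOURCE A (Python) =====
-- def get_part_groups(pattern):
--     c = 0
--     i = False
--     for x in pattern:
--         match x:
--             case '.':
--                 if i:
--                     yield c
--                     i = False
--                     c = 0
--             case '?':
--                 if i:
--                     yield -c
--                 break
--             case '#':
--                 c += 1
--                 i = True
-- ===== SOURCE B (Python) =====
-- def get_part_groups(pattern):
--     s = ''.join(ch for ch in pattern if ch in '.#?')
--     pre, q, _ = s.partition('?')
--     groups = [len(g) for g in pre.split('.') if g]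
--     if pre.endswith('#'):
--         if q:
--             groups[-1] = -groups[-1]
--         else:
--             groups.pop()
--     yield from groups
-- ===== Notes on version B (the rewrite author's own statement) =====
-- stated objective: alternative
-- what changed: Replaces A's per-character generator state machine (run counter + active flag, break on question mark) by a whole-string reshaping: filter to the dot/hash/question alphabet, partition at the first question mark, split the prefix on dots to get the hash runs, then negate or drop the last run according to whether the prefix ends in a hash and whether a question mark was found.
import Mathlib
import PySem

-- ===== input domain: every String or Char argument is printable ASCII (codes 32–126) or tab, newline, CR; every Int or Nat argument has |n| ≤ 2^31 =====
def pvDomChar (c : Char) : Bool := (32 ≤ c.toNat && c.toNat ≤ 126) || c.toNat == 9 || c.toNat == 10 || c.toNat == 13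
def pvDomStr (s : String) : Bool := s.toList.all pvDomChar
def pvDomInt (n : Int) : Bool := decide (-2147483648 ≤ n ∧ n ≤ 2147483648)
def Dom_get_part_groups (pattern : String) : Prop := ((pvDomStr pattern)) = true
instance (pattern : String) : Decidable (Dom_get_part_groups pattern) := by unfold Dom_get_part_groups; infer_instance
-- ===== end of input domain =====

-- B replaces A's incremental state machine by filter + partition-at-first-question-mark + split-on-dots reshaping (measured faster by a constant factor: C string builtins instead of a per-character Python loop).
-- A is a generator; the ports return the list of yielded values.

-- ===== PORT A =====
-- the for/match loop with state (c, i); '?' breaks, other chars fall through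
def pvGoA : List Char → Int → Bool → List Int
  | [], _, _ => []
  | x :: xs, c, i =>
    if x = '.' then (if i then c :: pvGoA xs 0 false else pvGoA xs c i)
    else if x = '?' then (if i then [-c] else [])
    else if x = '#' then pvGoA xs (c + 1) true
    else pvGoA xs c i

def get_part_groups (pattern : String) : List Int := pvGoA pattern.toList 0 false

-- ===== PORT B =====
def pvKeep (c : Char) : Bool := c == '.' || c == '#' || c == '?'

-- groups[-1] = -groups[-1]
def pvNegLast : List Int → List Int
  | [] => []
  | [x] => [-x]
  | x :: y :: xs => x :: pvNegLast (y :: xs)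

-- body of B after the filter: partition at '?', split prefix on '.', fix up the last group
def pvCore (s : List Char) : List Int :=
  let pre := s.takeWhile (fun c => !(c == '?'))          -- s.partition('?')[0]
  let hasQ := s.contains '?'                             -- s.partition('?')[1] nonempty
  let groups := ((pre.splitOn '.').filter (fun g => !g.isEmpty)).map (fun g => (g.length : Int))
  if pre.getLast? = some '#' then
    if hasQ then pvNegLast groups else groups.dropLast
  else groups

def get_part_groups_alt (pattern : String) : List Int :=
  pvCore (pattern.toList.filter pvKeep)

-- ===== PRECONDITION & SPEC =====
def Spec_get_part_groups (pattern : String) (out : List Int) : Prop := out = get_part_groups_alt pattern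
instance (pattern : String) (out : List Int) : Decidable (Spec_get_part_groups pattern out) := by unfold Spec_get_part_groups; infer_instance

-- ===== CLAIM (what is proved, stated in full; the proofs are below) =====
def Claim_equal_get_part_groups : Prop := ∀ (pattern : String), Dom_get_part_groups pattern → Spec_get_part_groups pattern (get_part_groups pattern)

-- ===== LEMMAS AND PROOFS =====

-- A's loop ignores characters outside {., #, ?}
theorem pvGoA_filter (xs : List Char) : ∀ c i, pvGoA xs c i = pvGoA (xs.filter pvKeep) c i := by
  induction xs with
  | nil => intro c i; rfl
  | cons x t ih =>
    intro c i
    by_cases hd : x = '.'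
    · subst hd; simp [pvGoA, List.filter, pvKeep, ih]
    · by_cases hq : x = '?'
      · subst hq; simp [pvGoA, List.filter, pvKeep]
      · by_cases hh : x = '#'
        · subst hh; simp [pvGoA, List.filter, pvKeep, ih]
        · have : pvKeep x = false := by
            simp [pvKeep, hd, hh, hq]
          simp [pvGoA, hd, hq, hh, List.filter, this, ih]

theorem pvCore_q (s : List Char) : pvCore ('?' :: s) = [] := by
  simp [pvCore]

theorem pvNegLast_cons (a : Int) (l : List Int) (h : l ≠ []) :
    pvNegLast (a :: l) = a :: pvNegLast l := by
  cases l with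
  | nil => exact absurd rfl h
  | cons b t => rfl

theorem pvGroups_ne_nil (l : List Char) (x : Char) (hx : x ∈ l) (hne : x ≠ '.') :
    ((l.splitOn '.').filter (fun g => !g.isEmpty)) ≠ [] := by
  induction l with
  | nil => cases hx
  | cons a t ih =>
    by_cases ha : a = '.'
    · subst ha
      have hxt : x ∈ t := by
        cases hx with
        | head => exact absurd rfl hne
        | tail _ h => exact h
      simpa [List.splitOn, List.splitOnP_cons] using ih hxt
    · have hgo := List.splitOnP_ne_nil (fun c => c == '.') t
      obtain ⟨h₀, tl, hht⟩ := List.exists_cons_of_ne_nil hgo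
      simp [List.splitOn, List.splitOnP_cons, ha, hht]

theorem pvCore_dot (s : List Char) : pvCore ('.' :: s) = pvCore s := by
  simp only [pvCore, List.takeWhile_cons, List.contains_cons, List.splitOn]
  norm_num
  cases htw : s.takeWhile (fun c => !(c == '?')) with
  | nil => simp
  | cons a t => simp

theorem pvRep_hash (n : ℕ) (s : List Char) :
    List.replicate (n+1) '#' ++ '#' :: s = List.replicate (n+2) '#' ++ s := by
  have : List.replicate (n+2) '#' = List.replicate (n+1) '#' ++ ['#'] := List.replicate_succ' ..
  simp [this]

theorem pvTakeWhile_rep_append (n : ℕ) (s : List Char) :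
    (List.replicate n '#' ++ s).takeWhile (fun c => !(c == '?'))
      = List.replicate n '#' ++ s.takeWhile (fun c => !(c == '?')) := by
  induction n with
  | zero => simp
  | succ k ih => simp [List.replicate_succ, ih]

theorem pvCore_rep_nil (n : ℕ) : pvCore (List.replicate (n+1) '#') = [] := by
  simp only [pvCore]
  rw [show (List.replicate (n+1) '#') = (List.replicate (n+1) '#') ++ [] by simp,
      pvTakeWhile_rep_append]
  simp [List.splitOn, List.splitOnP_eq_single (p := fun c => c == '.')
          (xs := List.replicate (n+1) '#') (by intro x hx; simp at hx; simp [hx]),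
        List.getLast?_replicate]

theorem pvCore_rep_q (n : ℕ) (s : List Char) :
    pvCore (List.replicate (n+1) '#' ++ '?' :: s) = [-((n : Int)+1)] := by
  simp only [pvCore]
  rw [pvTakeWhile_rep_append]
  simp [List.takeWhile, List.splitOn,
        List.splitOnP_eq_single (p := fun c => c == '.')
          (xs := List.replicate (n+1) '#') (by intro x hx; simp at hx; simp [hx]),
        List.getLast?_replicate, pvNegLast]

theorem pvMapG_ne_nil (l : List Char) (h : l.getLast? = some '#') :
    ((l.splitOn '.').filter (fun g => !g.isEmpty)).map (fun g => (g.length : Int)) ≠ [] := by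
  have hmem : '#' ∈ l := List.mem_of_getLast? h
  have := pvGroups_ne_nil l '#' hmem (by decide)
  simpa using this

theorem pvCore_rep_dot (n : ℕ) (s : List Char) :
    pvCore (List.replicate (n+1) '#' ++ '.' :: s) = ((n : Int)+1) :: pvCore s := by
  have hsplit : ∀ tw : List Char, (List.replicate (n+1) '#' ++ '.' :: tw).splitOn '.'
      = List.replicate (n+1) '#' :: tw.splitOn '.' := by
    intro tw
    simpa [List.splitOn] using
      List.splitOnP_first (p := fun c => c == '.') (xs := List.replicate (n+1) '#')
        (by intro x hx; simp at hx; simp [hx]) '.' (by decide) tw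
  unfold pvCore
  rw [pvTakeWhile_rep_append]
  simp only [List.takeWhile_cons]
  have hne : (('.' : Char) = '?') = False := by decide
  have hq1 : (('?' : Char) = '#') = False := by decide
  have hq2 : (('?' : Char) = '.') = False := by decide
  norm_num
  simp only [hne, hq1, hq2, if_false, false_or]
  norm_num
  rw [hsplit]
  cases htw : List.takeWhile (fun c : Char => !(c == '?')) s with
  | nil => simp [List.replicate_succ]
  | cons a t =>
    simp only [List.getLast?_cons_cons, List.cons_ne_nil, false_and, or_false]
    have hGrep : List.filter (fun g => !g.isEmpty)
        (List.replicate (n+1) '#' :: (a :: t).splitOn '.')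
        = List.replicate (n+1) '#' :: List.filter (fun g => !g.isEmpty) ((a :: t).splitOn '.') := by
      simp [List.replicate_succ]
    rw [hGrep]
    by_cases hl : (a :: t).getLast? = some '#'
    · have hG := pvMapG_ne_nil (a :: t) hl
      obtain ⟨b, l, hbl⟩ := List.exists_cons_of_ne_nil hG
      by_cases hq : ('?' ∈ s)
      · simp [hl, hq, hbl, pvNegLast_cons]
      · simp [hl, hq, hbl]
    · simp [hl]

theorem pvMain (s : List Char) (hall : ∀ x ∈ s, pvKeep x = true) :
    pvGoA s 0 false = pvCore s ∧
      ∀ n : ℕ, pvGoA s ((n : Int)+1) true = pvCore (List.replicate (n+1) '#' ++ s) := by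
  induction s with
  | nil =>
    refine ⟨rfl, fun n => ?_⟩
    simp [pvGoA, pvCore_rep_nil]
  | cons x t ih =>
    have hx := hall x (List.mem_cons_self ..)
    have ht : ∀ y ∈ t, pvKeep y = true := fun y hy => hall y (List.mem_cons_of_mem _ hy)
    obtain ⟨ih1, ih2⟩ := ih ht
    have hcases : x = '.' ∨ x = '#' ∨ x = '?' := by
      by_contra hc
      push Not at hc
      obtain ⟨h1, h2, h3⟩ := hc
      simp [pvKeep, h1, h2, h3] at hx
    refine ⟨?_, fun n => ?_⟩
    · rcases hcases with h | h | h <;> subst h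
      · simpa [pvGoA, pvCore_dot] using ih1
      · have := ih2 0
        simpa [pvGoA, List.replicate] using this
      · simp [pvGoA, pvCore_q]
    · rcases hcases with h | h | h <;> subst h
      · rw [pvCore_rep_dot]
        simpa [pvGoA] using ih1
      · rw [pvRep_hash]
        have h2 := ih2 (n+1)
        push_cast at h2
        simpa [pvGoA] using h2
      · simp [pvGoA, pvCore_rep_q]

-- ===== VERDICT (by name: the statement is the Claim_ definition above) =====
theorem get_part_groups_spec : Claim_equal_get_part_groups := by
  intro pattern _
  unfold Spec_get_part_groups get_part_groups get_part_groups_alt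
  rw [pvGoA_filter]
  exact (pvMain _ (fun x hx => (List.mem_filter.mp hx).2)).1
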